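-- pv_equiv track=rewrite | github.com/Lekshmi38/exNova-2 | constraint_handler.py | process_program_elective_data
-- ===== SOURCE A (Python) =====
-- from collections import defaultdict, Counter
--
-- def process_program_elective_data(raw_data):
--     """Process program elective specific data format"""
--     subj_map = defaultdict(list)
--     counts = Counter()
--
--     for roll, branch, subject in raw_data:
--         key = f"{branch}:{subject}"
--         subj_map[key].append({"roll": roll, "subj": key})
--         counts[key] += 1
--
--     for key in subj_map:
--         subj_map[key].sort(key=lambda x: x['roll'])
--
--     return subj_map, dict(counts)
-- ===== SOURCE B (Python) =====
-- from collections import defaultdict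
--
-- def process_program_elective_data(raw_data):
--     """Process program elective specific data format"""
--     # distinct keys in first-appearance order
--     keys = list(dict.fromkeys(f"{branch}:{subject}" for _, branch, subject in raw_data))
--     # one global stable sort by roll; per-group order then needs no per-group sort
--     srt = sorted(raw_data, key=lambda r: r[0])
--     subj_map = defaultdict(list)
--     counts = {}
--     for k in keys:
--         grp = [{"roll": roll, "subj": k}
--                for roll, branch, subject in srt if f"{branch}:{subject}" == k]
--         subj_map[k] = grp
--         counts[k] = len(grp)
--     return subj_map, counts
-- ===== Notes on version B (the rewrite author's own statement) =====
-- stated objective: alternative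
-- what changed: A builds groups in one pass and then sorts each group separately; B does one global stable sort by roll and then builds each group (and its count) by a per-key filter over the sorted list, needing no per-group sort.
import Mathlib
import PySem

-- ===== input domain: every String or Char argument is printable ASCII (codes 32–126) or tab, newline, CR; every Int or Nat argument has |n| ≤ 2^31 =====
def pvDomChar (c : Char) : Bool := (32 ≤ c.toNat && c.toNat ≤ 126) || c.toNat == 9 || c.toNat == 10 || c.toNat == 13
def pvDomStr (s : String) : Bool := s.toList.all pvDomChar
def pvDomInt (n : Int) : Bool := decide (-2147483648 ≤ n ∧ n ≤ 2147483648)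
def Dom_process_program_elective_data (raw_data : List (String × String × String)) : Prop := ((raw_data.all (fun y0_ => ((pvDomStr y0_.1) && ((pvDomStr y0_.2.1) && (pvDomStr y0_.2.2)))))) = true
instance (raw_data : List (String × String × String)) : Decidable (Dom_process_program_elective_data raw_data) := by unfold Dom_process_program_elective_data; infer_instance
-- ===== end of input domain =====

-- B replaces A's per-group sort by one global stable sort followed by a single
-- grouping pass (per-key filter); same return value, different decomposition.

-- ===== PORT A =====
-- shared helpers: the f-string key and the row dict literal
def pvKey (t : String × String × String) : String := t.2.1 ++ ":" ++ t.2.2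
def pvRow (roll k : String) : List (String × String) := [("roll", roll), ("subj", k)]
-- x['roll'] on the row dict (key always present in the rows both programs build)
def pvRoll (row : List (String × String)) : String := (PySem.Dict.mk row).getD "roll" ""

def process_program_elective_data (raw_data : List (String × String × String)) : (List (String × List (List (String × String)))) × (List (String × Int)) :=
  -- one loop maintaining subj_map (defaultdict(list)) and counts (Counter)
  let st := raw_data.foldl
      (fun (st : PySem.Dict String (List (List (String × String))) × PySem.Dict String Int) t =>
        let key := pvKey t
        (st.1.modify key [] (fun v => v ++ [pvRow t.1 key]),
         st.2.modify key 0 (fun c => c + 1)))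
      (PySem.Dict.empty, PySem.Dict.empty)
  -- for key in subj_map: subj_map[key].sort(key=lambda x: x['roll'])
  (st.1.items.map (fun p => (p.1, PySem.List.sorted p.2 pvRoll false)), st.2.items)

-- ===== PORT B =====
def pvGrp (srt : List (String × String × String)) (k : String) : List (List (String × String)) :=
  (srt.filter (fun t => pvKey t == k)).map (fun t => pvRow t.1 k)

def process_program_elective_data_alt (raw_data : List (String × String × String)) : (List (String × List (List (String × String)))) × (List (String × Int)) :=
  -- list(dict.fromkeys(...)) : distinct keys in first-appearance order
  let keys := PySem.List.dedup (raw_data.map pvKey)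
  -- one global stable sort by roll
  let srt := PySem.List.sorted raw_data (fun r => r.1) false
  (keys.map (fun k => (k, pvGrp srt k)),
   keys.map (fun k => (k, ((pvGrp srt k).length : Int))))

-- ===== PRECONDITION & SPEC =====
def Spec_process_program_elective_data (raw_data : List (String × String × String)) (out : (List (String × List (List (String × String)))) × (List (String × Int))) : Prop := out = process_program_elective_data_alt raw_data
instance (raw_data : List (String × String × String)) (out : (List (String × List (List (String × String)))) × (List (String × Int))) : Decidable (Spec_process_program_elective_data raw_data out) := by unfold Spec_process_program_elective_data; infer_instance

-- ===== CLAIM (what is proved, stated in full; the proofs are below) =====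
def Claim_equal_process_program_elective_data : Prop := ∀ (raw_data : List (String × String × String)), Dom_process_program_elective_data raw_data → Spec_process_program_elective_data raw_data (process_program_elective_data raw_data)

-- ===== LEMMAS AND PROOFS =====

-- insertBy commutes with mapping when the keys correspond
theorem pv_insertBy_map {α β κ : Type} [LT κ] [DecidableLT κ] (f : α → β)
    (key : β → κ) (key' : α → κ) (h : ∀ a, key (f a) = key' a) (x : α) :
    ∀ acc : List α,
      PySem.List.insertBy (fun a b => decide (key a < key b)) (f x) (acc.map f)
        = (PySem.List.insertBy (fun a b => decide (key' a < key' b)) x acc).map f := by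
  intro acc
  induction acc with
  | nil => simp [PySem.List.insertBy]
  | cons y ys ih =>
      simp only [List.map_cons, PySem.List.insertBy, h]
      split <;> simp [ih]

theorem pv_foldl_insertBy_map {α β κ : Type} [LT κ] [DecidableLT κ] (f : α → β)
    (key : β → κ) (key' : α → κ) (h : ∀ a, key (f a) = key' a) :
    ∀ (l acc : List α),
      l.foldl (fun acc x => PySem.List.insertBy (fun a b => decide (key a < key b)) (f x) acc) (acc.map f)
        = (l.foldl (fun acc x => PySem.List.insertBy (fun a b => decide (key' a < key' b)) x acc) acc).map f := by
  intro l
  induction l with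
  | nil => intro acc; simp
  | cons x xs ih =>
      intro acc
      simp only [List.foldl_cons]
      rw [pv_insertBy_map f key key' h, ih]

-- sorted of a mapped list, when the key of the image is a key of the preimage
theorem pv_sorted_map {α β κ : Type} [LinearOrder κ] (f : α → β)
    (key : β → κ) (key' : α → κ) (h : ∀ a, key (f a) = key' a) (l : List α) :
    PySem.List.sorted (l.map f) key false = (PySem.List.sorted l key' false).map f := by
  rw [PySem.List.sorted_eq_foldl_insertBy, PySem.List.sorted_eq_foldl_insertBy, List.foldl_map]
  simpa using pv_foldl_insertBy_map f key key' h l []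

-- insertBy into a key-sorted accumulator keeps it key-sorted
theorem pv_pairwise_insertBy {α κ : Type} [LinearOrder κ] (key : α → κ) (x : α) :
    ∀ acc : List α, acc.Pairwise (fun a b => key a ≤ key b) →
      (PySem.List.insertBy (fun a b => decide (key a < key b)) x acc).Pairwise (fun a b => key a ≤ key b) := by
  intro acc
  induction acc with
  | nil => intro _; simp [PySem.List.insertBy]
  | cons y ys ih =>
      intro hp
      rw [List.pairwise_cons] at hp
      simp only [PySem.List.insertBy]
      split
      · rename_i hlt
        rw [decide_eq_true_iff] at hlt
        refine List.Pairwise.cons ?_ (List.Pairwise.cons hp.1 hp.2)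
        intro z hz
        rcases List.mem_cons.1 hz with rfl | hz
        · exact le_of_lt hlt
        · exact le_trans (le_of_lt hlt) (hp.1 z hz)
      · rename_i hge
        rw [decide_eq_true_iff] at hge
        rw [not_lt] at hge
        refine List.Pairwise.cons ?_ (ih hp.2)
        intro z hz
        rcases (PySem.List.mem_insertBy _ _ _ _).1 hz with rfl | hz
        · exact hge
        · exact hp.1 z hz

-- filter commutes with insertBy into a key-sorted accumulator
theorem pv_filter_insertBy {α κ : Type} [LinearOrder κ] (key : α → κ) (p : α → Bool) (x : α) :
    ∀ acc : List α, acc.Pairwise (fun a b => key a ≤ key b) →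
      (PySem.List.insertBy (fun a b => decide (key a < key b)) x acc).filter p
        = if p x then PySem.List.insertBy (fun a b => decide (key a < key b)) x (acc.filter p)
          else acc.filter p := by
  intro acc
  induction acc with
  | nil => intro _; cases hx : p x <;> simp [PySem.List.insertBy, hx]
  | cons y ys ih =>
      intro hp
      rw [List.pairwise_cons] at hp
      simp only [PySem.List.insertBy]
      split
      · rename_i hlt
        rw [decide_eq_true_iff] at hlt
        cases hx : p x with
        | false => simp [hx]
        | true =>
            cases hy : p y with
            | true => simp [hx, hy, PySem.List.insertBy, hlt]
            | false =>
                simp only [List.filter_cons, hx, hy, if_true]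
                -- x is before every element of ys, hence before every kept one
                cases hf : ys.filter p with
                | nil => simp [PySem.List.insertBy]
                | cons z zs =>
                    have hz : z ∈ ys := List.mem_of_mem_filter (hf ▸ List.mem_cons_self ..)
                    have : key x < key z := lt_of_lt_of_le hlt (hp.1 z hz)
                    simp [PySem.List.insertBy, this]
      · rename_i hge
        rw [decide_eq_true_iff] at hge
        rw [not_lt] at hge
        cases hx : p x with
        | false =>
            cases hy : p y <;>
              simp [hx, hy, ih hp.2]
        | true =>
            cases hy : p y with
            | false => simp [hx, hy, ih hp.2]
            | true =>
                simp only [List.filter_cons, hx, hy, if_true]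
                have : ¬ key x < key y := not_lt.2 hge
                simp [PySem.List.insertBy, this, ih hp.2, hx]

theorem pv_filter_foldl_insertBy {α κ : Type} [LinearOrder κ] (key : α → κ) (p : α → Bool) :
    ∀ (l acc : List α), acc.Pairwise (fun a b => key a ≤ key b) →
      (l.foldl (fun acc x => PySem.List.insertBy (fun a b => decide (key a < key b)) x acc) acc).filter p
        = (l.filter p).foldl (fun acc x => PySem.List.insertBy (fun a b => decide (key a < key b)) x acc) (acc.filter p) := by
  intro l
  induction l with
  | nil => intro acc _; simp
  | cons x xs ih =>
      intro acc hp
      simp only [List.foldl_cons, List.filter_cons]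
      rw [ih _ (pv_pairwise_insertBy key x acc hp), pv_filter_insertBy key p x acc hp]
      cases hx : p x <;> simp

-- filter commutes with Python's stable sort
theorem pv_filter_sorted {α κ : Type} [LinearOrder κ] (key : α → κ) (p : α → Bool) (l : List α) :
    (PySem.List.sorted l key false).filter p = PySem.List.sorted (l.filter p) key false := by
  rw [PySem.List.sorted_eq_foldl_insertBy, PySem.List.sorted_eq_foldl_insertBy]
  simpa using pv_filter_foldl_insertBy key p l [] List.Pairwise.nil

theorem pv_roll_row (r k : String) : pvRoll (pvRow r k) = r := by
  simp [pvRoll, pvRow, PySem.Dict.getD_eq_get?_getD, PySem.Dict.get?_mk_cons]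

-- A's first loop, split and characterised
theorem pv_groups_getD (raw_data : List (String × String × String)) (k : String) :
    (raw_data.foldl (fun d t => d.modify (pvKey t) [] (fun v => v ++ [pvRow t.1 (pvKey t)]))
        (PySem.Dict.empty : PySem.Dict String (List (List (String × String))))).getD k []
      = (raw_data.filter (fun t => pvKey t == k)).map (fun t => pvRow t.1 k) := by
  have h := PySem.Dict.getD_foldl_modify_append
      (raw_data.map (fun t => (pvKey t, pvRow t.1 (pvKey t))))
      (PySem.Dict.empty : PySem.Dict String (List (List (String × String)))) k
  rw [List.foldl_map] at h
  simp only [h, PySem.Dict.getD_empty, List.nil_append, List.filter_map, List.map_map]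
  refine List.map_congr_left ?_
  intro t ht
  have : pvKey t = k := by
    have := List.of_mem_filter ht
    simpa using this
  simp [Function.comp, this]

theorem pv_counts_getD (raw_data : List (String × String × String)) (k : String) :
    (raw_data.foldl (fun d t => d.modify (pvKey t) 0 (fun c => c + 1))
        (PySem.Dict.empty : PySem.Dict String Int)).getD k 0
      = ((raw_data.map pvKey).count k : Int) := by
  have h := PySem.Dict.getD_foldl_modify_add_one (raw_data.map pvKey)
      (PySem.Dict.empty : PySem.Dict String Int) k
  rw [List.foldl_map] at h
  simp only [h, PySem.Dict.getD_empty, zero_add]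

-- ===== VERDICT (by name: the statement is the Claim_ definition above) =====
theorem process_program_elective_data_spec : Claim_equal_process_program_elective_data := by
  intro raw_data _
  unfold Spec_process_program_elective_data
  simp only [process_program_elective_data, process_program_elective_data_alt]
  rw [PySem.List.foldl_prod_mk
    (fun (d : PySem.Dict String (List (List (String × String)))) (t : String × String × String) =>
      d.modify (pvKey t) [] (fun v => v ++ [pvRow t.1 (pvKey t)]))
    (fun (d : PySem.Dict String Int) (t : String × String × String) =>
      d.modify (pvKey t) 0 (fun c => c + 1))
    raw_data PySem.Dict.empty PySem.Dict.empty]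
  set d1 := raw_data.foldl (fun d t => d.modify (pvKey t) [] (fun v => v ++ [pvRow t.1 (pvKey t)]))
      (PySem.Dict.empty : PySem.Dict String (List (List (String × String)))) with hd1
  set d2 := raw_data.foldl (fun d t => d.modify (pvKey t) 0 (fun c => c + 1))
      (PySem.Dict.empty : PySem.Dict String Int) with hd2
  have hkeys1 : d1.keys = PySem.Set.ofList (raw_data.map pvKey) := by
    rw [hd1, PySem.Dict.keys_foldl_modify_key raw_data pvKey [] (fun _ t v => v ++ [pvRow t.1 (pvKey t)])]
    simp [PySem.Dict.keys_empty, PySem.Set.update, PySem.Set.ofList_eq_foldl]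
  have hkeys2 : d2.keys = PySem.Set.ofList (raw_data.map pvKey) := by
    rw [hd2, PySem.Dict.keys_foldl_modify_key raw_data pvKey 0 (fun _ _ c => c + 1)]
    simp [PySem.Dict.keys_empty, PySem.Set.update, PySem.Set.ofList_eq_foldl]
  have hnd1 : d1.keys.Nodup := by
    rw [hd1]
    exact PySem.Dict.nodup_keys_foldl_modify_key raw_data pvKey []
      (fun _ t v => v ++ [pvRow t.1 (pvKey t)]) _ (by simp)
  have hnd2 : d2.keys.Nodup := by
    rw [hd2]
    exact PySem.Dict.nodup_keys_foldl_modify_key raw_data pvKey 0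
      (fun _ _ c => c + 1) _ (by simp)
  rw [PySem.Dict.items_eq_map_keys d1 hnd1 [], PySem.Dict.items_eq_map_keys d2 hnd2 0,
      hkeys1, hkeys2, List.map_map]
  show _ = (_ , _)
  refine Prod.ext ?_ ?_
  · show (PySem.Set.ofList (raw_data.map pvKey)).map _ = (PySem.List.dedup (raw_data.map pvKey)).map _
    refine List.map_congr_left ?_
    intro k _
    simp only [Function.comp]
    refine Prod.ext rfl ?_
    show PySem.List.sorted (d1.getD k []) pvRoll false = pvGrp (PySem.List.sorted raw_data (fun r => r.1) false) k
    rw [hd1, pv_groups_getD raw_data k]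
    rw [pv_sorted_map (fun t : String × String × String => pvRow t.1 k) pvRoll (fun t => t.1) (fun t => pv_roll_row t.1 k)]
    unfold pvGrp
    rw [pv_filter_sorted (fun r : String × String × String => r.1) (fun t => pvKey t == k) raw_data]
  · show (PySem.Set.ofList (raw_data.map pvKey)).map _ = (PySem.List.dedup (raw_data.map pvKey)).map _
    refine List.map_congr_left ?_
    intro k _
    refine Prod.ext rfl ?_
    show d2.getD k 0 = ((pvGrp (PySem.List.sorted raw_data (fun r => r.1) false) k).length : Int)
    rw [hd2, pv_counts_getD raw_data k]
    unfold pvGrp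
    rw [pv_filter_sorted (fun r : String × String × String => r.1) (fun t => pvKey t == k) raw_data]
    simp [List.count_eq_countP, List.countP_eq_length_filter, List.filter_map, List.length_map, Function.comp_def]
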